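-- pv_equiv track=rewrite | github.com/ZeyuuLiu/SEAMiLab-Deconstructing-Amnesia | src/memory_eval/adapters/memos_adapter.py | _resolve_speakers
-- ===== SOURCE A (Python) =====
-- from typing import Any, Dict, List
--
-- def _resolve_speakers(turns: List[Dict[str, Any]]) -> tuple[str, str]:
--     speakers = []
--     for turn in turns:
--         speaker = str(turn.get("speaker", "")).strip()
--         if speaker and speaker not in speakers:
--             speakers.append(speaker)
--     if not speakers:
--         return "speaker_a", "speaker_b"
--     if len(speakers) == 1:
--         return speakers[0], "speaker_b"
--     return speakers[0], speakers[1]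
-- ===== SOURCE B (Python) =====
-- from typing import Any, Dict, List
--
-- def _resolve_speakers(turns: List[Dict[str, Any]]) -> tuple[str, str]:
--     first = None
--     for turn in turns:
--         speaker = str(turn.get("speaker", "")).strip()
--         if speaker:
--             first = speaker
--             break
--     if first is None:
--         return "speaker_a", "speaker_b"
--     for turn in turns:
--         speaker = str(turn.get("speaker", "")).strip()
--         if speaker and speaker != first:
--             return first, speaker
--     return first, "speaker_b"
-- ===== Notes on version B (the rewrite author's own statement) =====
-- stated objective: simpler
-- what changed: Replaces the dedup-list-building pass with two early-exit scans: one finds the first non-empty stripped speaker, a second finds the first different one; no list is maintained.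
import Mathlib
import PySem

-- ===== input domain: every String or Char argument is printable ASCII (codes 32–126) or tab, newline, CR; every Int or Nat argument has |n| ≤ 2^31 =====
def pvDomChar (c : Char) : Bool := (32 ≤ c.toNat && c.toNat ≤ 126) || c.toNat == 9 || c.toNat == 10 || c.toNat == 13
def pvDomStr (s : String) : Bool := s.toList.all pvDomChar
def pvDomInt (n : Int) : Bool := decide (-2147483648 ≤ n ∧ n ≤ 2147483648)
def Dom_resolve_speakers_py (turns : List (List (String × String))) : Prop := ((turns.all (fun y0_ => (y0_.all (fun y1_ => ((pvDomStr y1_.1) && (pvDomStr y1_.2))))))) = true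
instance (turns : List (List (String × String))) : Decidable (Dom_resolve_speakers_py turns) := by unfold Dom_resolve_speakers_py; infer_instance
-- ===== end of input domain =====

-- B replaces A's dedup-list-building pass with two early-exit scans (first speaker, then first different speaker); objective: simpler.


-- ===== PORT A =====
-- speaker = str(turn.get("speaker", "")).strip()  (values are strings, so str() is the identity)
def pvSpk (turn : List (String × String)) : String :=
  PySem.Str.strip ((PySem.Dict.mk turn).getD "speaker" "")

-- the 'for turn in turns' loop accumulating the dedup list 'speakers'
def pvLoopA : List (List (String × String)) → List String → List String
  | [], acc => acc
  | t :: ts, acc =>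
      let s := pvSpk t
      if s ≠ "" ∧ s ∉ acc then pvLoopA ts (acc ++ [s]) else pvLoopA ts acc

def resolve_speakers_py (turns : List (List (String × String))) : String × String :=
  match pvLoopA turns [] with
  | [] => ("speaker_a", "speaker_b")
  | [a] => (a, "speaker_b")
  | a :: b :: _ => (a, b)

-- ===== PORT B =====
-- first scan: first non-empty stripped speaker
def pvFindFirst : List (List (String × String)) → Option String
  | [] => none
  | t :: ts => let s := pvSpk t; if s ≠ "" then some s else pvFindFirst ts

-- second scan: first non-empty stripped speaker different from 'first'
def pvFindSecond (first : String) : List (List (String × String)) → Option String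
  | [] => none
  | t :: ts => let s := pvSpk t; if s ≠ "" ∧ s ≠ first then some s else pvFindSecond first ts

def resolve_speakers_py_alt (turns : List (List (String × String))) : String × String :=
  match pvFindFirst turns with
  | none => ("speaker_a", "speaker_b")
  | some a =>
    match pvFindSecond a turns with
    | none => (a, "speaker_b")
    | some b => (a, b)

-- ===== PRECONDITION & SPEC =====
def Spec_resolve_speakers_py (turns : List (List (String × String))) (out : String × String) : Prop := out = resolve_speakers_py_alt turns
instance (turns : List (List (String × String))) (out : String × String) : Decidable (Spec_resolve_speakers_py turns out) := by unfold Spec_resolve_speakers_py; infer_instance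

-- ===== CLAIM (what is proved, stated in full; the proofs are below) =====
def Claim_equal_resolve_speakers_py : Prop := ∀ (turns : List (List (String × String))), Dom_resolve_speakers_py turns → Spec_resolve_speakers_py turns (resolve_speakers_py turns)

-- ===== LEMMAS AND PROOFS =====

-- the accumulator is a prefix of the loop's result
theorem pvLoopA_prefix (ts : List (List (String × String))) (acc : List String) :
    acc <+: pvLoopA ts acc := by
  induction ts generalizing acc with
  | nil => simp [pvLoopA]
  | cons t ts ih =>
    simp only [pvLoopA]
    split
    · exact List.IsPrefix.trans (List.prefix_append acc [pvSpk t]) (ih _)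
    · exact ih acc

-- with one speaker a already found, the second element of A's list is B's second scan
theorem pvLoopA_second (ts : List (List (String × String))) (a : String) :
    (pvLoopA ts [a]).tail.head? = pvFindSecond a ts := by
  induction ts with
  | nil => simp [pvLoopA, pvFindSecond]
  | cons t ts ih =>
    simp only [pvLoopA, pvFindSecond, List.mem_singleton]
    split
    · obtain ⟨r, hr⟩ := pvLoopA_prefix ts [a, pvSpk t]
      simp [← hr]
    · exact ih

-- head and second element of A's list are B's two scans
theorem pvLoopA_main (ts : List (List (String × String))) :
    (pvLoopA ts []).head? = pvFindFirst ts ∧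
    (∀ a, pvFindFirst ts = some a → (pvLoopA ts []).tail.head? = pvFindSecond a ts) := by
  induction ts with
  | nil => simp [pvLoopA, pvFindFirst]
  | cons t ts ih =>
    simp only [pvLoopA, pvFindFirst]
    by_cases hs : pvSpk t = ""
    · simp only [hs, ne_eq, not_true_eq_false, false_and, if_false]
      refine ⟨ih.1, fun a ha => ?_⟩
      rw [ih.2 a ha, pvFindSecond]
      simp [hs]
    · rw [if_pos (⟨hs, List.not_mem_nil⟩ : pvSpk t ≠ "" ∧ pvSpk t ∉ ([] : List String)), if_pos hs]
      obtain ⟨r, hr⟩ := pvLoopA_prefix ts ([] ++ [pvSpk t])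
      constructor
      · simp only [List.nil_append] at hr
        simp [← hr]
      · intro a ha
        injection ha with ha; subst ha
        rw [List.nil_append, pvLoopA_second]
        simp [pvFindSecond, hs]

-- ===== VERDICT (by name: the statement is the Claim_ definition above) =====
theorem resolve_speakers_py_spec : Claim_equal_resolve_speakers_py := by
  intro turns _
  unfold Spec_resolve_speakers_py resolve_speakers_py resolve_speakers_py_alt
  obtain ⟨h1, h2⟩ := pvLoopA_main turns
  cases hf : pvFindFirst turns with
  | none =>
    rw [hf] at h1
    cases hL : pvLoopA turns [] with
    | nil => simp
    | cons a r => simp [hL] at h1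
  | some a =>
    rw [hf] at h1
    have h2' := h2 a hf
    cases hL : pvLoopA turns [] with
    | nil => simp [hL] at h1
    | cons x r =>
      rw [hL] at h1 h2'
      simp only [List.head?] at h1
      injection h1 with h1; subst h1
      cases hs : pvFindSecond x turns with
      | none =>
        rw [hs] at h2'
        cases r with
        | nil => simp [hs]
        | cons b r' => simp at h2'
      | some b =>
        rw [hs] at h2'
        cases r with
        | nil => simp at h2'
        | cons c r' =>
          simp only [List.tail_cons, List.head?] at h2'
          injection h2' with h2'; subst h2'
          simp [hs]
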